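-- pv_equiv track=rewrite | github.com/ashishlodaya123/Agentic-AI-project | backend/app/agents/predictive_analytics_agent.py | _check_risk_factor
-- ===== SOURCE A (Python) =====
-- from typing import Dict, List, Any
--
-- def _check_risk_factor(factor: str, symptoms: str, age: int, gender: str,
--                       medical_history: List[str], symptoms_analysis: dict) -> bool:
--     """Check if a risk factor is present."""
--     # Check symptoms
--     if factor in symptoms:
--         return True
--
--     # Check age
--     if factor == "age_over_65" and age > 65:
--         return True
--
--     # Check gender
--     if factor == "male" and gender.lower() == "male":
--         return True
--
--     # Check medical history
--     for history_item in medical_history: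
--         history_lower = history_item.lower()
--         if factor == "hypertension" and "hypertension" in history_lower:
--             return True
--         elif factor == "diabetes" and "diabetes" in history_lower:
--             return True
--         elif factor == "smoking" and ("smoking" in history_lower or "smoker" in history_lower):
--             return True
--         elif factor == "asthma" and "asthma" in history_lower:
--             return True
--         elif factor == "copd" and ("copd" in history_lower or "chronic obstructive pulmonary" in history_lower):
--             return True
--         elif factor == "immunocompromised" and ("immunocompromised" in history_lower or "immunosuppressed" in history_lower):
--             return True
--         elif factor == "recent_surgery" and "surgery" in history_lower:
--             return True
--         elif factor == "chronic_kidney_disease" and ("kidney" in history_lower or "renal" in history_lower):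
--             return True
--         elif factor == "obesity" and ("obesity" in history_lower or "morbid" in history_lower):
--             return True
--         elif factor == "chronic_disease" and ("chronic" in history_lower):
--             return True
--         elif factor == "family_history" and "family" in history_lower:
--             return True
--         elif factor == "high_cholesterol" and ("cholesterol" in history_lower or "hyperlipidemia" in history_lower):
--             return True
--         elif factor == "pneumonia_history" and "pneumonia" in history_lower:
--             return True
--         elif factor == "stroke_history" and ("stroke" in history_lower or "cva" in history_lower):
--             return True
--         elif factor == "seizure_history" and ("seizure" in history_lower or "epilepsy" in history_lower):
--             return True
--         elif factor == "hospitalization" and ("hospital" in history_lower):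
--             return True
--         elif factor == "medication_nephrotoxicity" and ("nsaid" in history_lower or "contrast" in history_lower):
--             return True
--         elif factor == "poor_nutrition" and ("malnutrition" in history_lower or "underweight" in history_lower):
--             return True
--
--     # Check symptoms analysis for additional factors
--     if symptoms_analysis:
--         primary_concerns = symptoms_analysis.get("primary_concerns", [])
--         for concern in primary_concerns:
--             concern_name = concern.get("name", "").lower()
--             concern_type = concern.get("type", "").lower()
--
--             if factor == "chest_pain" and "chest" in concern_name:
--                 return True
--             elif factor == "shortness_of_breath" and ("breath" in concern_name or "dyspnea" in concern_name):
--                 return True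
--             elif factor == "headache" and "headache" in concern_name:
--                 return True
--             elif factor == "dizziness" and ("dizziness" in concern_name or "vertigo" in concern_name):
--                 return True
--             elif factor == "fever" and "fever" in concern_name:
--                 return True
--
--     return False
-- ===== SOURCE B (Python) =====
-- from typing import List
--
-- # Flat (factor, keyword) rules; no keyword contains "\n", so searching the
-- # newline-joined lowercase blob is equivalent to searching each item.
-- HISTORY_RULES = (
--     ("hypertension", "hypertension"), ("diabetes", "diabetes"),
--     ("smoking", "smoking"), ("smoking", "smoker"),
--     ("asthma", "asthma"),
--     ("copd", "copd"), ("copd", "chronic obstructive pulmonary"),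
--     ("immunocompromised", "immunocompromised"), ("immunocompromised", "immunosuppressed"),
--     ("recent_surgery", "surgery"),
--     ("chronic_kidney_disease", "kidney"), ("chronic_kidney_disease", "renal"),
--     ("obesity", "obesity"), ("obesity", "morbid"),
--     ("chronic_disease", "chronic"),
--     ("family_history", "family"),
--     ("high_cholesterol", "cholesterol"), ("high_cholesterol", "hyperlipidemia"),
--     ("pneumonia_history", "pneumonia"),
--     ("stroke_history", "stroke"), ("stroke_history", "cva"),
--     ("seizure_history", "seizure"), ("seizure_history", "epilepsy"),
--     ("hospitalization", "hospital"),
--     ("medication_nephrotoxicity", "nsaid"), ("medication_nephrotoxicity", "contrast"),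
--     ("poor_nutrition", "malnutrition"), ("poor_nutrition", "underweight"),
-- )
--
-- CONCERN_RULES = (
--     ("chest_pain", "chest"),
--     ("shortness_of_breath", "breath"), ("shortness_of_breath", "dyspnea"),
--     ("headache", "headache"),
--     ("dizziness", "dizziness"), ("dizziness", "vertigo"),
--     ("fever", "fever"),
-- )
--
-- def _check_risk_factor(factor: str, symptoms: str, age: int, gender: str,
--                        medical_history: List[str], symptoms_analysis: dict) -> bool:
--     if factor in symptoms:
--         return True
--     if factor == "age_over_65" and age > 65:
--         return True
--     if factor == "male" and gender.lower() == "male":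
--         return True
--     history_blob = "\n".join(medical_history).lower()
--     if any(f == factor and kw in history_blob for f, kw in HISTORY_RULES):
--         return True
--     concerns = symptoms_analysis.get("primary_concerns", [])
--     concern_blob = "\n".join(c.get("name", "") for c in concerns).lower()
--     return any(f == factor and kw in concern_blob for f, kw in CONCERN_RULES)
-- ===== Notes on version B (the rewrite author's own statement) =====
-- stated objective: alternative
-- what changed: B replaces A's per-item loops with their 18/5-way elif chains by building one newline-joined lowercase blob of the history (and of the concern names) and doing a single substring search per entry of a flat (factor, keyword) rules list; correct because no keyword contains a newline, so a match in the blob is exactly a match in some item.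
import Mathlib
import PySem

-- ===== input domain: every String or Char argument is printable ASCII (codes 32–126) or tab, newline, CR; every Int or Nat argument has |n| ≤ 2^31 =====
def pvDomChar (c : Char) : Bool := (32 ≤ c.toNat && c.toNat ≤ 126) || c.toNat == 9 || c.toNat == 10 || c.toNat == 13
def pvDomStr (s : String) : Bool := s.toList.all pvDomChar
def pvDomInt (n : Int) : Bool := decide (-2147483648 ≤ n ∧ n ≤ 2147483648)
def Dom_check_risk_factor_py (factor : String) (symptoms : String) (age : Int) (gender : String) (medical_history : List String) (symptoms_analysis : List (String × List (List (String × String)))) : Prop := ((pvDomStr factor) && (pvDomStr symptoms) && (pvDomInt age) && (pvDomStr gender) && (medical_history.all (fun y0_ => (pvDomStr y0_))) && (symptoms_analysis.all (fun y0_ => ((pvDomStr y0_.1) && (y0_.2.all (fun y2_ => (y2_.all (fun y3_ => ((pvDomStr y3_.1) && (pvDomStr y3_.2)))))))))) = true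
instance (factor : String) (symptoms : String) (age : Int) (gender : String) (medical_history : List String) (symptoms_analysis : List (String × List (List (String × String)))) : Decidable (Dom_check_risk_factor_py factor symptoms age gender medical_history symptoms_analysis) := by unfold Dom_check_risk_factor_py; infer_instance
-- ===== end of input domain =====

-- B replaces the per-item keyword chains by one newline-joined lowercase blob searched once per (factor, keyword) rule (objective: alternative; return value only).

-- ===== PORT A =====
-- A's history elif chain, applied to one already-lowercased history item
def aHistItem (factor : String) (hl : String) : Bool :=
  if factor == "hypertension" && PySem.Str.isIn "hypertension" hl then true
  else if factor == "diabetes" && PySem.Str.isIn "diabetes" hl then true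
  else if factor == "smoking" && (PySem.Str.isIn "smoking" hl || PySem.Str.isIn "smoker" hl) then true
  else if factor == "asthma" && PySem.Str.isIn "asthma" hl then true
  else if factor == "copd" && (PySem.Str.isIn "copd" hl || PySem.Str.isIn "chronic obstructive pulmonary" hl) then true
  else if factor == "immunocompromised" && (PySem.Str.isIn "immunocompromised" hl || PySem.Str.isIn "immunosuppressed" hl) then true
  else if factor == "recent_surgery" && PySem.Str.isIn "surgery" hl then true
  else if factor == "chronic_kidney_disease" && (PySem.Str.isIn "kidney" hl || PySem.Str.isIn "renal" hl) then true
  else if factor == "obesity" && (PySem.Str.isIn "obesity" hl || PySem.Str.isIn "morbid" hl) then true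
  else if factor == "chronic_disease" && PySem.Str.isIn "chronic" hl then true
  else if factor == "family_history" && PySem.Str.isIn "family" hl then true
  else if factor == "high_cholesterol" && (PySem.Str.isIn "cholesterol" hl || PySem.Str.isIn "hyperlipidemia" hl) then true
  else if factor == "pneumonia_history" && PySem.Str.isIn "pneumonia" hl then true
  else if factor == "stroke_history" && (PySem.Str.isIn "stroke" hl || PySem.Str.isIn "cva" hl) then true
  else if factor == "seizure_history" && (PySem.Str.isIn "seizure" hl || PySem.Str.isIn "epilepsy" hl) then true
  else if factor == "hospitalization" && PySem.Str.isIn "hospital" hl then true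
  else if factor == "medication_nephrotoxicity" && (PySem.Str.isIn "nsaid" hl || PySem.Str.isIn "contrast" hl) then true
  else if factor == "poor_nutrition" && (PySem.Str.isIn "malnutrition" hl || PySem.Str.isIn "underweight" hl) then true
  else false

-- A's `for history_item in medical_history` loop (a fired branch returns True)
def aHistLoop (factor : String) : List String → Bool
  | [] => false
  | h :: rest => if aHistItem factor (PySem.Str.lower h) then true else aHistLoop factor rest

-- A's concern elif chain, applied to one already-lowercased concern name
def aConcernItem (factor : String) (nm : String) : Bool :=
  if factor == "chest_pain" && PySem.Str.isIn "chest" nm then true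
  else if factor == "shortness_of_breath" && (PySem.Str.isIn "breath" nm || PySem.Str.isIn "dyspnea" nm) then true
  else if factor == "headache" && PySem.Str.isIn "headache" nm then true
  else if factor == "dizziness" && (PySem.Str.isIn "dizziness" nm || PySem.Str.isIn "vertigo" nm) then true
  else if factor == "fever" && PySem.Str.isIn "fever" nm then true
  else false

-- A's `for concern in primary_concerns` loop; A also computes concern_type and never uses it
def aConcernLoop (factor : String) : List (List (String × String)) → Bool
  | [] => false
  | c :: rest =>
      let nm := PySem.Str.lower (PySem.Dict.getD (PySem.Dict.mk c) "name" "")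
      let _ty := PySem.Str.lower (PySem.Dict.getD (PySem.Dict.mk c) "type" "")
      if aConcernItem factor nm then true else aConcernLoop factor rest

def check_risk_factor_py (factor : String) (symptoms : String) (age : Int) (gender : String) (medical_history : List String) (symptoms_analysis : List (String × List (List (String × String)))) : Bool :=
  if PySem.Str.isIn factor symptoms then true
  else if factor == "age_over_65" && decide (age > 65) then true
  else if factor == "male" && (PySem.Str.lower gender == "male") then true
  else if aHistLoop factor medical_history then true
  else if symptoms_analysis.isEmpty then false
  else aConcernLoop factor (PySem.Dict.getD (PySem.Dict.mk symptoms_analysis) "primary_concerns" [])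

-- ===== PORT B =====
-- flat (factor, keyword) rules; no keyword contains a newline
def pvHistRules : List (String × String) := [("hypertension", "hypertension"), ("diabetes", "diabetes"), ("smoking", "smoking"), ("smoking", "smoker"), ("asthma", "asthma"), ("copd", "copd"), ("copd", "chronic obstructive pulmonary"), ("immunocompromised", "immunocompromised"), ("immunocompromised", "immunosuppressed"), ("recent_surgery", "surgery"), ("chronic_kidney_disease", "kidney"), ("chronic_kidney_disease", "renal"), ("obesity", "obesity"), ("obesity", "morbid"), ("chronic_disease", "chronic"), ("family_history", "family"), ("high_cholesterol", "cholesterol"), ("high_cholesterol", "hyperlipidemia"), ("pneumonia_history", "pneumonia"), ("stroke_history", "stroke"), ("stroke_history", "cva"), ("seizure_history", "seizure"), ("seizure_history", "epilepsy"), ("hospitalization", "hospital"), ("medication_nephrotoxicity", "nsaid"), ("medication_nephrotoxicity", "contrast"), ("poor_nutrition", "malnutrition"), ("poor_nutrition", "underweight")]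

def pvConcernRules : List (String × String) := [("chest_pain", "chest"), ("shortness_of_breath", "breath"), ("shortness_of_breath", "dyspnea"), ("headache", "headache"), ("dizziness", "dizziness"), ("dizziness", "vertigo"), ("fever", "fever")]

-- concern.get("name", "")
def pvNameOf (c : List (String × String)) : String := PySem.Dict.getD (PySem.Dict.mk c) "name" ""

def check_risk_factor_py_alt (factor : String) (symptoms : String) (age : Int) (gender : String) (medical_history : List String) (symptoms_analysis : List (String × List (List (String × String)))) : Bool :=
  if PySem.Str.isIn factor symptoms then true
  else if factor == "age_over_65" && decide (age > 65) then true
  else if factor == "male" && (PySem.Str.lower gender == "male") then true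
  else if pvHistRules.any (fun r => r.1 == factor && PySem.Str.isIn r.2 (PySem.Str.lower (PySem.Str.join "\n" medical_history))) then true
  else
    pvConcernRules.any (fun r => r.1 == factor && PySem.Str.isIn r.2 (PySem.Str.lower (PySem.Str.join "\n" ((PySem.Dict.getD (PySem.Dict.mk symptoms_analysis) "primary_concerns" []).map pvNameOf))))

-- ===== PRECONDITION & SPEC =====
def Spec_check_risk_factor_py (factor : String) (symptoms : String) (age : Int) (gender : String) (medical_history : List String) (symptoms_analysis : List (String × List (List (String × String)))) (out : Bool) : Prop := out = check_risk_factor_py_alt factor symptoms age gender medical_history symptoms_analysis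
instance (factor : String) (symptoms : String) (age : Int) (gender : String) (medical_history : List String) (symptoms_analysis : List (String × List (List (String × String)))) (out : Bool) : Decidable (Spec_check_risk_factor_py factor symptoms age gender medical_history symptoms_analysis out) := by unfold Spec_check_risk_factor_py; infer_instance

-- ===== CLAIM (what is proved, stated in full; the proofs are below) =====
def Claim_equal_check_risk_factor_py : Prop := ∀ (factor : String) (symptoms : String) (age : Int) (gender : String) (medical_history : List String) (symptoms_analysis : List (String × List (List (String × String)))), Dom_check_risk_factor_py factor symptoms age gender medical_history symptoms_analysis → Spec_check_risk_factor_py factor symptoms age gender medical_history symptoms_analysis (check_risk_factor_py factor symptoms age gender medical_history symptoms_analysis)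

-- ===== LEMMAS AND PROOFS =====

-- a keyword without a newline is a prefix of `x ++ '\n' :: r` iff it is a prefix of `x`
lemma prefix_newline (k : List Char) : '\n' ∉ k → ∀ (x r : List Char), k <+: x ++ '\n' :: r ↔ k <+: x := by
  induction k with
  | nil => intro _ x r; simp
  | cons c k' ih =>
    intro hnl x r
    cases x with
    | nil =>
      simp only [List.nil_append, List.prefix_nil]
      constructor
      · intro h
        rw [List.cons_prefix_cons] at h
        exact absurd (h.1 ▸ List.mem_cons_self) hnl
      · intro h; exact absurd h (by simp)
    | cons a x' =>
      simp only [List.cons_append, List.cons_prefix_cons]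
      rw [ih (fun hm => hnl (List.mem_cons_of_mem _ hm)) x' r]

-- a nonempty newline-free keyword is an infix of `x ++ '\n' :: r` iff it is an infix of `x` or of `r`
lemma infix_newline (k : List Char) (hk : k ≠ []) (hnl : '\n' ∉ k) :
    ∀ (x r : List Char), k <:+: x ++ '\n' :: r ↔ k <:+: x ∨ k <:+: r := by
  intro x
  induction x with
  | nil =>
    intro r
    simp only [List.nil_append, List.infix_cons_iff]
    have hp : ¬ k <+: '\n' :: r := by
      rcases k with _ | ⟨c, k'⟩
      · exact absurd rfl hk
      · intro h
        rw [List.cons_prefix_cons] at h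
        exact hnl (h.1 ▸ List.mem_cons_self)
    have hn : ¬ k <:+: ([] : List Char) := by rw [List.infix_nil]; exact hk
    tauto
  | cons a x' ih =>
    intro r
    rw [List.cons_append, List.infix_cons_iff, List.infix_cons_iff (l₂ := x')]
    rw [← List.cons_append, prefix_newline k hnl (a :: x') r, ih r]
    tauto

-- a nonempty newline-free keyword is an infix of the newline-joined parts iff it is an infix of some part
lemma infix_join (k : List Char) (hk : k ≠ []) (hnl : '\n' ∉ k) :
    ∀ (ps : List (List Char)), k <:+: PySem.Chars.join ['\n'] ps ↔ ∃ p ∈ ps, k <:+: p := by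
  intro ps
  induction ps with
  | nil => simp [PySem.Chars.join_nil, List.infix_nil, hk]
  | cons p ps ih =>
    cases ps with
    | nil => simp [PySem.Chars.join_singleton]
    | cons q qs =>
      rw [show PySem.Chars.join ['\n'] (p :: q :: qs) = p ++ '\n' :: PySem.Chars.join ['\n'] (q :: qs) from by
            rw [PySem.Chars.join_cons_cons]; simp,
        infix_newline k hk hnl, ih]
      simp only [List.mem_cons]
      constructor
      · rintro (h | ⟨w, hw, h⟩)
        · exact ⟨p, Or.inl rfl, h⟩
        · exact ⟨w, Or.inr hw, h⟩
      · rintro ⟨w, (rfl | hw), h⟩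
        · exact Or.inl h
        · exact Or.inr ⟨w, hw, h⟩

-- lowercasing commutes with the newline join
lemma lower_join : ∀ (ps : List (List Char)),
    PySem.Chars.lower (PySem.Chars.join ['\n'] ps) = PySem.Chars.join ['\n'] (ps.map PySem.Chars.lower) := by
  intro ps
  induction ps with
  | nil => simp [PySem.Chars.join_nil, PySem.Chars.lower]
  | cons p ps ih =>
    cases ps with
    | nil => simp [PySem.Chars.join_singleton]
    | cons q qs =>
      have hnlc : PySem.Chars.lowerChar '\n' = '\n' := by decide
      rw [PySem.Chars.join_cons_cons, List.map_cons, List.map_cons, PySem.Chars.join_cons_cons,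
        ← List.map_cons, ← ih]
      simp [PySem.Chars.lower, hnlc]

-- B's single blob search equals A's per-item search, for any nonempty newline-free keyword
lemma str_blob (k : String) (hk : k.toList ≠ []) (hnl : '\n' ∉ k.toList) (mh : List String) :
    PySem.Str.isIn k (PySem.Str.lower (PySem.Str.join "\n" mh)) = mh.any (fun h => PySem.Str.isIn k (PySem.Str.lower h)) := by
  rw [Bool.eq_iff_iff]
  rw [PySem.Str.isIn_iff_infix, List.any_eq_true]
  have h1 : (PySem.Str.lower (PySem.Str.join "\n" mh)).toList
      = PySem.Chars.join ['\n'] ((mh.map String.toList).map PySem.Chars.lower) := by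
    rw [PySem.Str.toList_lower, PySem.Str.toList_join]
    exact lower_join (mh.map String.toList)
  rw [h1, infix_join k.toList hk hnl]
  constructor
  · rintro ⟨p, hp, h⟩
    simp only [List.mem_map] at hp
    obtain ⟨cs, ⟨s, hs, rfl⟩, rfl⟩ := hp
    exact ⟨s, hs, by rw [PySem.Str.isIn_iff_infix, PySem.Str.toList_lower]; exact h⟩
  · rintro ⟨s, hs, h⟩
    refine ⟨PySem.Chars.lower s.toList, ?_, ?_⟩
    · simp only [List.mem_map]
      exact ⟨s.toList, ⟨s, hs, rfl⟩, rfl⟩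
    · rw [PySem.Str.isIn_iff_infix, PySem.Str.toList_lower] at h; exact h

-- distributing `any` over a Boolean disjunction
lemma any_orb {α : Type} (p q : α → Bool) (l : List α) : (l.any fun x => p x || q x) = (l.any p || l.any q) := by
  induction l with
  | nil => rfl
  | cons a t ih => cases hp : p a <;> cases hq : q a <;> simp [List.any_cons, hp, hq, ih]

-- A's history loop as an `any`
lemma histLoop_any (factor : String) (mh : List String) :
    aHistLoop factor mh = mh.any (fun h => aHistItem factor (PySem.Str.lower h)) := by
  induction mh with
  | nil => rfl
  | cons h rest ih => rw [aHistLoop, ih]; simp [List.any_cons]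

-- A's concern loop as an `any` over the names
lemma concernLoop_any (factor : String) (cs : List (List (String × String))) :
    aConcernLoop factor cs = cs.any (fun c => aConcernItem factor (PySem.Str.lower (pvNameOf c))) := by
  induction cs with
  | nil => rfl
  | cons c rest ih => rw [aConcernLoop, ih]; simp [List.any_cons, pvNameOf]

-- A's whole history scan equals B's blob-and-rules scan
set_option maxHeartbeats 2000000 in
lemma hist_eq (factor : String) (mh : List String) :
    aHistLoop factor mh = pvHistRules.any (fun r => r.1 == factor && PySem.Str.isIn r.2 (PySem.Str.lower (PySem.Str.join "\n" mh))) := by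
  rw [histLoop_any]
  by_cases h1 : factor = "hypertension"
  · subst h1
    have hitem : ∀ hl, aHistItem "hypertension" hl = PySem.Str.isIn "hypertension" hl := by intro hl; simp [aHistItem]
    have hr : ∀ b, pvHistRules.any (fun r => r.1 == "hypertension" && PySem.Str.isIn r.2 b) = PySem.Str.isIn "hypertension" b := by intro b; simp [pvHistRules]
    simp only [hitem]
    rw [hr, str_blob "hypertension" (by decide) (by decide) mh]
  by_cases h2 : factor = "diabetes"
  · subst h2
    have hitem : ∀ hl, aHistItem "diabetes" hl = PySem.Str.isIn "diabetes" hl := by intro hl; simp [aHistItem]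
    have hr : ∀ b, pvHistRules.any (fun r => r.1 == "diabetes" && PySem.Str.isIn r.2 b) = PySem.Str.isIn "diabetes" b := by intro b; simp [pvHistRules]
    simp only [hitem]
    rw [hr, str_blob "diabetes" (by decide) (by decide) mh]
  by_cases h3 : factor = "smoking"
  · subst h3
    have hitem : ∀ hl, aHistItem "smoking" hl = (PySem.Str.isIn "smoking" hl || PySem.Str.isIn "smoker" hl) := by intro hl; simp [aHistItem]
    have hr : ∀ b, pvHistRules.any (fun r => r.1 == "smoking" && PySem.Str.isIn r.2 b) = (PySem.Str.isIn "smoking" b || PySem.Str.isIn "smoker" b) := by intro b; simp [pvHistRules]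
    simp only [hitem]
    rw [hr, str_blob "smoking" (by decide) (by decide) mh, str_blob "smoker" (by decide) (by decide) mh]
    rw [← any_orb]
  by_cases h4 : factor = "asthma"
  · subst h4
    have hitem : ∀ hl, aHistItem "asthma" hl = PySem.Str.isIn "asthma" hl := by intro hl; simp [aHistItem]
    have hr : ∀ b, pvHistRules.any (fun r => r.1 == "asthma" && PySem.Str.isIn r.2 b) = PySem.Str.isIn "asthma" b := by intro b; simp [pvHistRules]
    simp only [hitem]
    rw [hr, str_blob "asthma" (by decide) (by decide) mh]
  by_cases h5 : factor = "copd"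
  · subst h5
    have hitem : ∀ hl, aHistItem "copd" hl = (PySem.Str.isIn "copd" hl || PySem.Str.isIn "chronic obstructive pulmonary" hl) := by intro hl; simp [aHistItem]
    have hr : ∀ b, pvHistRules.any (fun r => r.1 == "copd" && PySem.Str.isIn r.2 b) = (PySem.Str.isIn "copd" b || PySem.Str.isIn "chronic obstructive pulmonary" b) := by intro b; simp [pvHistRules]
    simp only [hitem]
    rw [hr, str_blob "copd" (by decide) (by decide) mh, str_blob "chronic obstructive pulmonary" (by decide) (by decide) mh]
    rw [← any_orb]
  by_cases h6 : factor = "immunocompromised"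
  · subst h6
    have hitem : ∀ hl, aHistItem "immunocompromised" hl = (PySem.Str.isIn "immunocompromised" hl || PySem.Str.isIn "immunosuppressed" hl) := by intro hl; simp [aHistItem]
    have hr : ∀ b, pvHistRules.any (fun r => r.1 == "immunocompromised" && PySem.Str.isIn r.2 b) = (PySem.Str.isIn "immunocompromised" b || PySem.Str.isIn "immunosuppressed" b) := by intro b; simp [pvHistRules]
    simp only [hitem]
    rw [hr, str_blob "immunocompromised" (by decide) (by decide) mh, str_blob "immunosuppressed" (by decide) (by decide) mh]
    rw [← any_orb]
  by_cases h7 : factor = "recent_surgery"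
  · subst h7
    have hitem : ∀ hl, aHistItem "recent_surgery" hl = PySem.Str.isIn "surgery" hl := by intro hl; simp [aHistItem]
    have hr : ∀ b, pvHistRules.any (fun r => r.1 == "recent_surgery" && PySem.Str.isIn r.2 b) = PySem.Str.isIn "surgery" b := by intro b; simp [pvHistRules]
    simp only [hitem]
    rw [hr, str_blob "surgery" (by decide) (by decide) mh]
  by_cases h8 : factor = "chronic_kidney_disease"
  · subst h8
    have hitem : ∀ hl, aHistItem "chronic_kidney_disease" hl = (PySem.Str.isIn "kidney" hl || PySem.Str.isIn "renal" hl) := by intro hl; simp [aHistItem]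
    have hr : ∀ b, pvHistRules.any (fun r => r.1 == "chronic_kidney_disease" && PySem.Str.isIn r.2 b) = (PySem.Str.isIn "kidney" b || PySem.Str.isIn "renal" b) := by intro b; simp [pvHistRules]
    simp only [hitem]
    rw [hr, str_blob "kidney" (by decide) (by decide) mh, str_blob "renal" (by decide) (by decide) mh]
    rw [← any_orb]
  by_cases h9 : factor = "obesity"
  · subst h9
    have hitem : ∀ hl, aHistItem "obesity" hl = (PySem.Str.isIn "obesity" hl || PySem.Str.isIn "morbid" hl) := by intro hl; simp [aHistItem]
    have hr : ∀ b, pvHistRules.any (fun r => r.1 == "obesity" && PySem.Str.isIn r.2 b) = (PySem.Str.isIn "obesity" b || PySem.Str.isIn "morbid" b) := by intro b; simp [pvHistRules]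
    simp only [hitem]
    rw [hr, str_blob "obesity" (by decide) (by decide) mh, str_blob "morbid" (by decide) (by decide) mh]
    rw [← any_orb]
  by_cases h10 : factor = "chronic_disease"
  · subst h10
    have hitem : ∀ hl, aHistItem "chronic_disease" hl = PySem.Str.isIn "chronic" hl := by intro hl; simp [aHistItem]
    have hr : ∀ b, pvHistRules.any (fun r => r.1 == "chronic_disease" && PySem.Str.isIn r.2 b) = PySem.Str.isIn "chronic" b := by intro b; simp [pvHistRules]
    simp only [hitem]
    rw [hr, str_blob "chronic" (by decide) (by decide) mh]
  by_cases h11 : factor = "family_history"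
  · subst h11
    have hitem : ∀ hl, aHistItem "family_history" hl = PySem.Str.isIn "family" hl := by intro hl; simp [aHistItem]
    have hr : ∀ b, pvHistRules.any (fun r => r.1 == "family_history" && PySem.Str.isIn r.2 b) = PySem.Str.isIn "family" b := by intro b; simp [pvHistRules]
    simp only [hitem]
    rw [hr, str_blob "family" (by decide) (by decide) mh]
  by_cases h12 : factor = "high_cholesterol"
  · subst h12
    have hitem : ∀ hl, aHistItem "high_cholesterol" hl = (PySem.Str.isIn "cholesterol" hl || PySem.Str.isIn "hyperlipidemia" hl) := by intro hl; simp [aHistItem]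
    have hr : ∀ b, pvHistRules.any (fun r => r.1 == "high_cholesterol" && PySem.Str.isIn r.2 b) = (PySem.Str.isIn "cholesterol" b || PySem.Str.isIn "hyperlipidemia" b) := by intro b; simp [pvHistRules]
    simp only [hitem]
    rw [hr, str_blob "cholesterol" (by decide) (by decide) mh, str_blob "hyperlipidemia" (by decide) (by decide) mh]
    rw [← any_orb]
  by_cases h13 : factor = "pneumonia_history"
  · subst h13
    have hitem : ∀ hl, aHistItem "pneumonia_history" hl = PySem.Str.isIn "pneumonia" hl := by intro hl; simp [aHistItem]
    have hr : ∀ b, pvHistRules.any (fun r => r.1 == "pneumonia_history" && PySem.Str.isIn r.2 b) = PySem.Str.isIn "pneumonia" b := by intro b; simp [pvHistRules]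
    simp only [hitem]
    rw [hr, str_blob "pneumonia" (by decide) (by decide) mh]
  by_cases h14 : factor = "stroke_history"
  · subst h14
    have hitem : ∀ hl, aHistItem "stroke_history" hl = (PySem.Str.isIn "stroke" hl || PySem.Str.isIn "cva" hl) := by intro hl; simp [aHistItem]
    have hr : ∀ b, pvHistRules.any (fun r => r.1 == "stroke_history" && PySem.Str.isIn r.2 b) = (PySem.Str.isIn "stroke" b || PySem.Str.isIn "cva" b) := by intro b; simp [pvHistRules]
    simp only [hitem]
    rw [hr, str_blob "stroke" (by decide) (by decide) mh, str_blob "cva" (by decide) (by decide) mh]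
    rw [← any_orb]
  by_cases h15 : factor = "seizure_history"
  · subst h15
    have hitem : ∀ hl, aHistItem "seizure_history" hl = (PySem.Str.isIn "seizure" hl || PySem.Str.isIn "epilepsy" hl) := by intro hl; simp [aHistItem]
    have hr : ∀ b, pvHistRules.any (fun r => r.1 == "seizure_history" && PySem.Str.isIn r.2 b) = (PySem.Str.isIn "seizure" b || PySem.Str.isIn "epilepsy" b) := by intro b; simp [pvHistRules]
    simp only [hitem]
    rw [hr, str_blob "seizure" (by decide) (by decide) mh, str_blob "epilepsy" (by decide) (by decide) mh]
    rw [← any_orb]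
  by_cases h16 : factor = "hospitalization"
  · subst h16
    have hitem : ∀ hl, aHistItem "hospitalization" hl = PySem.Str.isIn "hospital" hl := by intro hl; simp [aHistItem]
    have hr : ∀ b, pvHistRules.any (fun r => r.1 == "hospitalization" && PySem.Str.isIn r.2 b) = PySem.Str.isIn "hospital" b := by intro b; simp [pvHistRules]
    simp only [hitem]
    rw [hr, str_blob "hospital" (by decide) (by decide) mh]
  by_cases h17 : factor = "medication_nephrotoxicity"
  · subst h17
    have hitem : ∀ hl, aHistItem "medication_nephrotoxicity" hl = (PySem.Str.isIn "nsaid" hl || PySem.Str.isIn "contrast" hl) := by intro hl; simp [aHistItem]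
    have hr : ∀ b, pvHistRules.any (fun r => r.1 == "medication_nephrotoxicity" && PySem.Str.isIn r.2 b) = (PySem.Str.isIn "nsaid" b || PySem.Str.isIn "contrast" b) := by intro b; simp [pvHistRules]
    simp only [hitem]
    rw [hr, str_blob "nsaid" (by decide) (by decide) mh, str_blob "contrast" (by decide) (by decide) mh]
    rw [← any_orb]
  by_cases h18 : factor = "poor_nutrition"
  · subst h18
    have hitem : ∀ hl, aHistItem "poor_nutrition" hl = (PySem.Str.isIn "malnutrition" hl || PySem.Str.isIn "underweight" hl) := by intro hl; simp [aHistItem]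
    have hr : ∀ b, pvHistRules.any (fun r => r.1 == "poor_nutrition" && PySem.Str.isIn r.2 b) = (PySem.Str.isIn "malnutrition" b || PySem.Str.isIn "underweight" b) := by intro b; simp [pvHistRules]
    simp only [hitem]
    rw [hr, str_blob "malnutrition" (by decide) (by decide) mh, str_blob "underweight" (by decide) (by decide) mh]
    rw [← any_orb]
  have e1 : (factor == "hypertension") = false := beq_eq_false_iff_ne.mpr h1
  have e2 : (factor == "diabetes") = false := beq_eq_false_iff_ne.mpr h2
  have e3 : (factor == "smoking") = false := beq_eq_false_iff_ne.mpr h3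
  have e4 : (factor == "asthma") = false := beq_eq_false_iff_ne.mpr h4
  have e5 : (factor == "copd") = false := beq_eq_false_iff_ne.mpr h5
  have e6 : (factor == "immunocompromised") = false := beq_eq_false_iff_ne.mpr h6
  have e7 : (factor == "recent_surgery") = false := beq_eq_false_iff_ne.mpr h7
  have e8 : (factor == "chronic_kidney_disease") = false := beq_eq_false_iff_ne.mpr h8
  have e9 : (factor == "obesity") = false := beq_eq_false_iff_ne.mpr h9
  have e10 : (factor == "chronic_disease") = false := beq_eq_false_iff_ne.mpr h10
  have e11 : (factor == "family_history") = false := beq_eq_false_iff_ne.mpr h11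
  have e12 : (factor == "high_cholesterol") = false := beq_eq_false_iff_ne.mpr h12
  have e13 : (factor == "pneumonia_history") = false := beq_eq_false_iff_ne.mpr h13
  have e14 : (factor == "stroke_history") = false := beq_eq_false_iff_ne.mpr h14
  have e15 : (factor == "seizure_history") = false := beq_eq_false_iff_ne.mpr h15
  have e16 : (factor == "hospitalization") = false := beq_eq_false_iff_ne.mpr h16
  have e17 : (factor == "medication_nephrotoxicity") = false := beq_eq_false_iff_ne.mpr h17
  have e18 : (factor == "poor_nutrition") = false := beq_eq_false_iff_ne.mpr h18
  have f1 : ("hypertension" == factor) = false := beq_eq_false_iff_ne.mpr (Ne.symm h1)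
  have f2 : ("diabetes" == factor) = false := beq_eq_false_iff_ne.mpr (Ne.symm h2)
  have f3 : ("smoking" == factor) = false := beq_eq_false_iff_ne.mpr (Ne.symm h3)
  have f4 : ("asthma" == factor) = false := beq_eq_false_iff_ne.mpr (Ne.symm h4)
  have f5 : ("copd" == factor) = false := beq_eq_false_iff_ne.mpr (Ne.symm h5)
  have f6 : ("immunocompromised" == factor) = false := beq_eq_false_iff_ne.mpr (Ne.symm h6)
  have f7 : ("recent_surgery" == factor) = false := beq_eq_false_iff_ne.mpr (Ne.symm h7)
  have f8 : ("chronic_kidney_disease" == factor) = false := beq_eq_false_iff_ne.mpr (Ne.symm h8)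
  have f9 : ("obesity" == factor) = false := beq_eq_false_iff_ne.mpr (Ne.symm h9)
  have f10 : ("chronic_disease" == factor) = false := beq_eq_false_iff_ne.mpr (Ne.symm h10)
  have f11 : ("family_history" == factor) = false := beq_eq_false_iff_ne.mpr (Ne.symm h11)
  have f12 : ("high_cholesterol" == factor) = false := beq_eq_false_iff_ne.mpr (Ne.symm h12)
  have f13 : ("pneumonia_history" == factor) = false := beq_eq_false_iff_ne.mpr (Ne.symm h13)
  have f14 : ("stroke_history" == factor) = false := beq_eq_false_iff_ne.mpr (Ne.symm h14)
  have f15 : ("seizure_history" == factor) = false := beq_eq_false_iff_ne.mpr (Ne.symm h15)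
  have f16 : ("hospitalization" == factor) = false := beq_eq_false_iff_ne.mpr (Ne.symm h16)
  have f17 : ("medication_nephrotoxicity" == factor) = false := beq_eq_false_iff_ne.mpr (Ne.symm h17)
  have f18 : ("poor_nutrition" == factor) = false := beq_eq_false_iff_ne.mpr (Ne.symm h18)
  have hitem : ∀ hl, aHistItem factor hl = false := by intro hl; simp [aHistItem, e1, e2, e3, e4, e5, e6, e7, e8, e9, e10, e11, e12, e13, e14, e15, e16, e17, e18]
  have hr : pvHistRules.any (fun r => r.1 == factor && PySem.Str.isIn r.2 (PySem.Str.lower (PySem.Str.join "\n" mh))) = false := by simp [pvHistRules, f1, f2, f3, f4, f5, f6, f7, f8, f9, f10, f11, f12, f13, f14, f15, f16, f17, f18]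
  rw [hr]
  simp only [hitem]
  simp

-- A's whole concern scan equals B's blob-and-rules scan
set_option maxHeartbeats 2000000 in
lemma concern_eq (factor : String) (cs : List (List (String × String))) :
    aConcernLoop factor cs = pvConcernRules.any (fun r => r.1 == factor && PySem.Str.isIn r.2 (PySem.Str.lower (PySem.Str.join "\n" (cs.map pvNameOf)))) := by
  rw [concernLoop_any]
  by_cases h1 : factor = "chest_pain"
  · subst h1
    have hitem : ∀ hl, aConcernItem "chest_pain" hl = PySem.Str.isIn "chest" hl := by intro hl; simp [aConcernItem]
    have hr : ∀ b, pvConcernRules.any (fun r => r.1 == "chest_pain" && PySem.Str.isIn r.2 b) = PySem.Str.isIn "chest" b := by intro b; simp [pvConcernRules]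
    simp only [hitem]
    rw [hr, str_blob "chest" (by decide) (by decide) (cs.map pvNameOf)]
    rw [List.any_map]; rfl
  by_cases h2 : factor = "shortness_of_breath"
  · subst h2
    have hitem : ∀ hl, aConcernItem "shortness_of_breath" hl = (PySem.Str.isIn "breath" hl || PySem.Str.isIn "dyspnea" hl) := by intro hl; simp [aConcernItem]
    have hr : ∀ b, pvConcernRules.any (fun r => r.1 == "shortness_of_breath" && PySem.Str.isIn r.2 b) = (PySem.Str.isIn "breath" b || PySem.Str.isIn "dyspnea" b) := by intro b; simp [pvConcernRules]
    simp only [hitem]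
    rw [hr, str_blob "breath" (by decide) (by decide) (cs.map pvNameOf), str_blob "dyspnea" (by decide) (by decide) (cs.map pvNameOf)]
    rw [← any_orb]
    rw [List.any_map]; rfl
  by_cases h3 : factor = "headache"
  · subst h3
    have hitem : ∀ hl, aConcernItem "headache" hl = PySem.Str.isIn "headache" hl := by intro hl; simp [aConcernItem]
    have hr : ∀ b, pvConcernRules.any (fun r => r.1 == "headache" && PySem.Str.isIn r.2 b) = PySem.Str.isIn "headache" b := by intro b; simp [pvConcernRules]
    simp only [hitem]
    rw [hr, str_blob "headache" (by decide) (by decide) (cs.map pvNameOf)]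
    rw [List.any_map]; rfl
  by_cases h4 : factor = "dizziness"
  · subst h4
    have hitem : ∀ hl, aConcernItem "dizziness" hl = (PySem.Str.isIn "dizziness" hl || PySem.Str.isIn "vertigo" hl) := by intro hl; simp [aConcernItem]
    have hr : ∀ b, pvConcernRules.any (fun r => r.1 == "dizziness" && PySem.Str.isIn r.2 b) = (PySem.Str.isIn "dizziness" b || PySem.Str.isIn "vertigo" b) := by intro b; simp [pvConcernRules]
    simp only [hitem]
    rw [hr, str_blob "dizziness" (by decide) (by decide) (cs.map pvNameOf), str_blob "vertigo" (by decide) (by decide) (cs.map pvNameOf)]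
    rw [← any_orb]
    rw [List.any_map]; rfl
  by_cases h5 : factor = "fever"
  · subst h5
    have hitem : ∀ hl, aConcernItem "fever" hl = PySem.Str.isIn "fever" hl := by intro hl; simp [aConcernItem]
    have hr : ∀ b, pvConcernRules.any (fun r => r.1 == "fever" && PySem.Str.isIn r.2 b) = PySem.Str.isIn "fever" b := by intro b; simp [pvConcernRules]
    simp only [hitem]
    rw [hr, str_blob "fever" (by decide) (by decide) (cs.map pvNameOf)]
    rw [List.any_map]; rfl
  have e1 : (factor == "chest_pain") = false := beq_eq_false_iff_ne.mpr h1
  have e2 : (factor == "shortness_of_breath") = false := beq_eq_false_iff_ne.mpr h2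
  have e3 : (factor == "headache") = false := beq_eq_false_iff_ne.mpr h3
  have e4 : (factor == "dizziness") = false := beq_eq_false_iff_ne.mpr h4
  have e5 : (factor == "fever") = false := beq_eq_false_iff_ne.mpr h5
  have f1 : ("chest_pain" == factor) = false := beq_eq_false_iff_ne.mpr (Ne.symm h1)
  have f2 : ("shortness_of_breath" == factor) = false := beq_eq_false_iff_ne.mpr (Ne.symm h2)
  have f3 : ("headache" == factor) = false := beq_eq_false_iff_ne.mpr (Ne.symm h3)
  have f4 : ("dizziness" == factor) = false := beq_eq_false_iff_ne.mpr (Ne.symm h4)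
  have f5 : ("fever" == factor) = false := beq_eq_false_iff_ne.mpr (Ne.symm h5)
  have hitem : ∀ hl, aConcernItem factor hl = false := by intro hl; simp [aConcernItem, e1, e2, e3, e4, e5]
  have hr : pvConcernRules.any (fun r => r.1 == factor && PySem.Str.isIn r.2 (PySem.Str.lower (PySem.Str.join "\n" (cs.map pvNameOf)))) = false := by simp [pvConcernRules, f1, f2, f3, f4, f5]
  rw [hr]
  simp only [hitem]
  simp

-- ===== VERDICT (by name: the statement is the Claim_ definition above) =====
theorem check_risk_factor_py_spec : Claim_equal_check_risk_factor_py := by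
  intro factor symptoms age gender medical_history symptoms_analysis _
  unfold Spec_check_risk_factor_py check_risk_factor_py check_risk_factor_py_alt
  rw [← hist_eq, ← concern_eq]
  cases symptoms_analysis with
  | nil => rfl
  | cons c rest => rfl
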